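-- pv_equiv track=rewrite | github.com/ArsLeicholt/gdrd_analysis | charge_calculation.py | calculate_charge
-- ===== SOURCE A (Python) =====
-- def calculate_charge(sequence):
--     """
--     Calculate net charge of an amino acid sequence.
--     Here, we assume:
--       - Lysine (K), Arginine (R), and Histidine (H) each contribute +1.
--       - Aspartic acid (D) and Glutamic acid (E) each contribute -1.
--     """
--     charge = 0
--     for aa in sequence.upper():
--         if aa in ('K', 'R', 'H'):
--             charge += 1
--         elif aa in ('D', 'E'):
--             charge -= 1
--     return charge
-- ===== SOURCE B (Python) =====
-- from collections import Counter
--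
-- def calculate_charge(sequence):
--     c = Counter(sequence.upper())
--     return c['K'] + c['R'] + c['H'] - c['D'] - c['E']
-- ===== Notes on version B (the rewrite author's own statement) =====
-- stated objective: idiomatic
-- what changed: Replaces the running signed accumulator with per-character if/elif branching by a one-pass Counter frequency table followed by a single branchless arithmetic combination of the five counts.
import Mathlib
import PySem

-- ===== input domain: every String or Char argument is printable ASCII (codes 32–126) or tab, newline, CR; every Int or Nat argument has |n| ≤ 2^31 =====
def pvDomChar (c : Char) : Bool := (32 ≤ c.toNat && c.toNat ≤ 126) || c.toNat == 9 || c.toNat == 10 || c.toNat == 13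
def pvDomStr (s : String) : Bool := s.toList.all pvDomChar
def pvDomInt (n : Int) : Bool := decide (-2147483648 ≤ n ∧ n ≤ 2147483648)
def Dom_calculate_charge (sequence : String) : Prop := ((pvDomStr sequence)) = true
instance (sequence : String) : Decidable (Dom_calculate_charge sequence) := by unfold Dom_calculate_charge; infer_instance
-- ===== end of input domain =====

-- B replaces A's per-character if/elif running accumulator by a one-pass Counter
-- frequency table combined with one arithmetic expression (idiomatic; same cost).

-- ===== PORT A =====
def calculate_charge (sequence : String) : Int :=
  (PySem.Str.upper sequence).toList.foldl
    (fun charge aa =>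
      if aa = 'K' ∨ aa = 'R' ∨ aa = 'H' then charge + 1
      else if aa = 'D' ∨ aa = 'E' then charge - 1
      else charge) 0

-- ===== PORT B =====
def calculate_charge_alt (sequence : String) : Int :=
  let c := PySem.Dict.counter (PySem.Str.upper sequence).toList
  c.getD 'K' 0 + c.getD 'R' 0 + c.getD 'H' 0 - c.getD 'D' 0 - c.getD 'E' 0

-- ===== PRECONDITION & SPEC =====
def Spec_calculate_charge (sequence : String) (out : Int) : Prop := out = calculate_charge_alt sequence
instance (sequence : String) (out : Int) : Decidable (Spec_calculate_charge sequence out) := by unfold Spec_calculate_charge; infer_instance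

-- ===== CLAIM (what is proved, stated in full; the proofs are below) =====
def Claim_equal_calculate_charge : Prop := ∀ (sequence : String), Dom_calculate_charge sequence → Spec_calculate_charge sequence (calculate_charge sequence)

-- ===== LEMMAS AND PROOFS =====
theorem charge_foldl_eq_counts (l : List Char) (c : Int) :
    l.foldl
      (fun charge aa =>
        if aa = 'K' ∨ aa = 'R' ∨ aa = 'H' then charge + 1
        else if aa = 'D' ∨ aa = 'E' then charge - 1
        else charge) c
    = c + l.count 'K' + l.count 'R' + l.count 'H' - l.count 'D' - l.count 'E' := by
  induction l generalizing c with
  | nil => simp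
  | cons x xs ih =>
    simp only [List.foldl_cons, List.count_cons, ih]
    by_cases hK : x = 'K' <;> by_cases hR : x = 'R' <;> by_cases hH : x = 'H' <;>
      by_cases hD : x = 'D' <;> by_cases hE : x = 'E' <;>
      simp_all <;> ring

-- ===== VERDICT (by name: the statement is the Claim_ definition above) =====
theorem calculate_charge_spec : Claim_equal_calculate_charge := by
  intro s _
  unfold Spec_calculate_charge calculate_charge calculate_charge_alt
  simp [PySem.Dict.getD_counter, charge_foldl_eq_counts]
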